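-- pv_equiv track=rewrite | github.com/NanProduced/interpretation-of-english-articles | server/app/services/dictionary/providers/ecdict.py | _parse_exchange
-- ===== SOURCE A (Python) =====
-- def _parse_exchange(exchange_str: str | None) -> list[str]:
--     """解析 exchange 字段为词形变换列表"""
--     if not exchange_str:
--         return []
--
--     # 格式: 'p:perceived/d:perceived/3:perceives/i:perceiving'
--     exchange = []
--     for part in exchange_str.split("/"):
--         if ":" in part:
--             _, value = part.split(":", 1)
--             exchange.append(value)
--     return exchange
-- ===== SOURCE B (Python) =====
-- def _parse_exchange(exchange_str):
--     """解析 exchange 字段为词形变换列表 — single left-to-right character scan (no split, no membership test)."""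
--     if not exchange_str:
--         return []
--     out = []
--     seen = False       # a colon has been seen in the current segment
--     buf = []           # characters after that colon in the current segment
--     for ch in exchange_str:
--         if ch == '/':
--             if seen:
--                 out.append(''.join(buf))
--             seen = False
--             buf = []
--         elif seen:
--             buf.append(ch)
--         elif ch == ':':
--             seen = True
--     if seen:
--         out.append(''.join(buf))
--     return out
-- ===== Notes on version B (the rewrite author's own statement) =====
-- stated objective: alternative
-- what changed: Replaces the slash-split plus per-part colon-membership test and bounded colon-split with a single left-to-right character scan maintaining a seen-colon flag and a value buffer; no split call or substring search remains.
import Mathlib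
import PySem

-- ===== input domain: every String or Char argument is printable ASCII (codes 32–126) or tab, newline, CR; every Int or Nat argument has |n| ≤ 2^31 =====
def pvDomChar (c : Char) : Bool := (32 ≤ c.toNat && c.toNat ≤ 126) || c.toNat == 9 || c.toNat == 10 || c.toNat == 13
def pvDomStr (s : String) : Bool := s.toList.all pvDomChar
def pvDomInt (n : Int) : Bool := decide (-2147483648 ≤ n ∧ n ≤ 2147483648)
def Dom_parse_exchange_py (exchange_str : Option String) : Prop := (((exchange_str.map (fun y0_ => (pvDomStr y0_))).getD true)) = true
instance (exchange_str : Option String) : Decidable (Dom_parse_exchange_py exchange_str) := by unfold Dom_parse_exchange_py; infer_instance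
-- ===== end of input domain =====

-- B replaces A's slash-split / colon-membership / bounded colon-split pipeline with a single
-- left-to-right character scan (seen-colon flag + value buffer); alternative, not faster.


-- ===== PORT A =====
-- the tuple unpack in A is total here because the membership guard guarantees two pieces
def pyParseExchangeStepA (acc : List String) (part : String) : List String :=
  if PySem.Str.isIn ":" part then
    acc ++ [((PySem.List.pyGet? ((PySem.Str.splitMax? part ":" 1).getD []) 1).getD "")]
  else acc

def parse_exchange_py (exchange_str : Option String) : List String :=
  match exchange_str with
  | none => []
  | some s =>
    if s = "" then []
    else ((PySem.Str.split? s "/").getD []).foldl pyParseExchangeStepA []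

-- ===== PORT B =====
-- state = (out, seen, buf): output so far, colon seen in current segment, chars after that colon
def pyParseExchangeStepB (st : List String × Bool × List Char) (ch : Char) :
    List String × Bool × List Char :=
  if ch = '/' then
    ((if st.2.1 then st.1 ++ [String.ofList st.2.2] else st.1), false, [])
  else if st.2.1 then (st.1, true, st.2.2 ++ [ch])
  else if ch = ':' then (st.1, true, st.2.2)
  else st

def parse_exchange_py_alt (exchange_str : Option String) : List String :=
  match exchange_str with
  | none => []
  | some s =>
    if s = "" then []
    else
      let st := s.toList.foldl pyParseExchangeStepB ([], false, [])
      if st.2.1 then st.1 ++ [String.ofList st.2.2] else st.1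

-- ===== PRECONDITION & SPEC =====
def Spec_parse_exchange_py (exchange_str : Option String) (out : List String) : Prop := out = parse_exchange_py_alt exchange_str
instance (exchange_str : Option String) (out : List String) : Decidable (Spec_parse_exchange_py exchange_str out) := by unfold Spec_parse_exchange_py; infer_instance

-- ===== CLAIM (what is proved, stated in full; the proofs are below) =====
def Claim_equal_parse_exchange_py : Prop := ∀ (exchange_str : Option String), Dom_parse_exchange_py exchange_str → Spec_parse_exchange_py exchange_str (parse_exchange_py exchange_str)

-- ===== LEMMAS AND PROOFS =====

-- split on a single-char separator, as a structural recursion: (first piece, later pieces)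
def splitCharP (d : Char) : List Char → List Char × List (List Char)
  | [] => ([], [])
  | c :: cs =>
    let r := splitCharP d cs
    if c = d then ([], r.1 :: r.2) else (c :: r.1, r.2)

-- everything after the first occurrence of d (⟦⟧ if d absent)
def afterFirst (d : Char) : List Char → List Char
  | [] => []
  | c :: cs => if c = d then cs else afterFirst d cs

-- everything before the first occurrence of d
def beforeFirst (d : Char) : List Char → List Char
  | [] => []
  | c :: cs => if c = d then [] else c :: beforeFirst d cs

lemma splitCharP_cons_self (d : Char) (cs : List Char) :
    splitCharP d (d :: cs) = ([], (splitCharP d cs).1 :: (splitCharP d cs).2) := by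
  simp [splitCharP]

lemma splitCharP_cons_ne (d c : Char) (cs : List Char) (h : c ≠ d) :
    splitCharP d (c :: cs) = (c :: (splitCharP d cs).1, (splitCharP d cs).2) := by
  simp [splitCharP, h]

lemma singleton_infix_iff (x : Char) (l : List Char) : [x] <:+: l ↔ x ∈ l := by
  constructor
  · intro h; exact h.mem (List.mem_singleton_self x)
  · intro h; obtain ⟨s, t, rfl⟩ := List.mem_iff_append.mp h; exact ⟨s, t, by simp⟩

lemma isPrefixOf_singleton_cons (d c : Char) (rest : List Char) :
    [d].isPrefixOf (c :: rest) = (d == c) := by simp [List.isPrefixOf]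

-- splitOn.go characterized by splitCharP (single-char separator, enough fuel)
lemma splitOn_go_eq (d : Char) :
    ∀ (l : List Char) (fuel : Nat), l.length ≤ fuel → ∀ (cur : List Char) (acc : List (List Char)),
    PySem.Chars.splitOn.go [d] fuel l cur acc =
      acc.reverse ++ (cur.reverse ++ (splitCharP d l).1) :: (splitCharP d l).2 := by
  intro l
  induction l with
  | nil => intro fuel _ cur acc; cases fuel <;> simp [PySem.Chars.splitOn.go, splitCharP]
  | cons c rest ih =>
    intro fuel hf cur acc
    cases fuel with
    | zero => simp at hf
    | succ f =>
      rw [PySem.Chars.splitOn.go]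
      by_cases hc : c = d
      · subst hc
        simp only [isPrefixOf_singleton_cons, beq_self_eq_true, if_pos, List.length_singleton,
          List.drop_succ_cons, List.drop_zero]
        rw [ih f (by simpa using hf) [] (cur.reverse :: acc)]
        simp [splitCharP]
      · have : ([d].isPrefixOf (c :: rest)) = false := by
          rw [isPrefixOf_singleton_cons]; simp [Ne.symm hc]
        simp only [this, Bool.false_eq_true, if_false]
        rw [ih f (by simpa using hf) (c :: cur) acc]
        simp [splitCharP, hc]

lemma splitOn_eq (d : Char) (l : List Char) :
    PySem.Chars.splitOn l [d] = (splitCharP d l).1 :: (splitCharP d l).2 := by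
  rw [PySem.Chars.splitOn, splitOn_go_eq d l (l.length + 1) (by omega) [] []]
  simp

-- splitOnMax.go with maxsplit 0: the whole remainder is the last piece
lemma splitOnMax_go_zero (d : Char) (l : List Char) (fuel : Nat) (cur : List Char)
    (acc : List (List Char)) :
    PySem.Chars.splitOnMax.go [d] fuel 0 l cur acc = acc.reverse ++ [cur.reverse ++ l] := by
  cases fuel with
  | zero => simp [PySem.Chars.splitOnMax.go]
  | succ f => cases l <;> simp [PySem.Chars.splitOnMax.go]

-- splitOnMax.go with maxsplit 1: split at the first occurrence of d only
lemma splitOnMax_go_one (d : Char) :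
    ∀ (l : List Char) (fuel : Nat), l.length ≤ fuel → ∀ (cur : List Char) (acc : List (List Char)),
    PySem.Chars.splitOnMax.go [d] fuel 1 l cur acc =
      if d ∈ l then acc.reverse ++ [cur.reverse ++ beforeFirst d l, afterFirst d l]
      else acc.reverse ++ [cur.reverse ++ l] := by
  intro l
  induction l with
  | nil => intro fuel _ cur acc; cases fuel <;> simp [PySem.Chars.splitOnMax.go]
  | cons c rest ih =>
    intro fuel hf cur acc
    cases fuel with
    | zero => simp at hf
    | succ f =>
      rw [PySem.Chars.splitOnMax.go]
      by_cases hc : c = d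
      · subst hc
        simp only [isPrefixOf_singleton_cons, beq_self_eq_true, if_pos, List.length_singleton,
          List.drop_succ_cons, List.drop_zero, one_ne_zero, if_false]
        rw [splitOnMax_go_zero]
        simp [beforeFirst, afterFirst]
      · have : ([d].isPrefixOf (c :: rest)) = false := by
          rw [isPrefixOf_singleton_cons]; simp [Ne.symm hc]
        simp only [this, Bool.false_eq_true, if_false, one_ne_zero]
        rw [ih f (by simpa using hf) (c :: cur) acc]
        by_cases hm : d ∈ rest <;>
          simp [hm, hc, beforeFirst, afterFirst, Ne.symm hc, List.append_assoc]

-- part.split(':', 1) characterized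
lemma splitMax_one_eq (d : Char) (l : List Char) :
    PySem.Chars.splitOnMax l [d] 1 =
      if d ∈ l then [beforeFirst d l, afterFirst d l] else [l] := by
  rw [PySem.Chars.splitOnMax]
  have h1 : ¬ ((1 : Int) < 0) := by norm_num
  rw [if_neg h1]
  simp only [Int.toNat_one]
  rw [splitOnMax_go_one d l (l.length + 1) (by omega) [] []]
  split <;> simp

-- A's per-part step on the char-list level
def stepAC (acc : List String) (p : List Char) : List String :=
  if ':' ∈ p then acc ++ [String.ofList (afterFirst ':' p)] else acc

lemma stepA_ofList (acc : List String) (p : List Char) :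
    pyParseExchangeStepA acc (String.ofList p) = stepAC acc p := by
  unfold pyParseExchangeStepA stepAC
  have hin : PySem.Str.isIn ":" (String.ofList p) = true ↔ ':' ∈ p := by
    rw [PySem.Str.isIn_iff_infix]
    simp [singleton_infix_iff]
  by_cases h : ':' ∈ p
  · rw [if_pos (hin.mpr h), if_pos h]
    have : PySem.Str.splitMax? (String.ofList p) ":" 1 =
        some ([beforeFirst ':' p, afterFirst ':' p].map String.ofList) := by
      rw [PySem.Str.splitMax?]
      have : PySem.Chars.splitMax? (String.ofList p).toList (":".toList) 1 =
          some (PySem.Chars.splitOnMax p [':'] 1) := by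
        simp [PySem.Chars.splitMax?]
      rw [this, splitMax_one_eq, if_pos h]
      rfl
    rw [this]
    simp [PySem.List.pyGet?, PySem.List.pyIdx?]
  · rw [if_neg (fun hc => h (hin.mp hc)), if_neg h]

-- B's final flush, as a function of the scan state
def finishB (st : List String × Bool × List Char) : List String :=
  if st.2.1 then st.1 ++ [String.ofList st.2.2] else st.1

-- B's scan, started in any reachable state, equals A's fold over the remaining segments
lemma scan_main :
    ∀ (cs : List Char) (out : List String) (seen : Bool) (buf : List Char),
    (seen = false → buf = []) →
    finishB (cs.foldl pyParseExchangeStepB (out, seen, buf)) =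
      (splitCharP '/' cs).2.foldl stepAC
        (out ++ (if seen then [String.ofList (buf ++ (splitCharP '/' cs).1)]
                 else if ':' ∈ (splitCharP '/' cs).1 then
                   [String.ofList (afterFirst ':' (splitCharP '/' cs).1)]
                 else [])) := by
  intro cs
  induction cs with
  | nil =>
    intro out seen buf hinv
    cases seen with
    | false => simp [finishB, splitCharP, hinv rfl]
    | true => simp [finishB, splitCharP]
  | cons c rest ih =>
    intro out seen buf hinv
    rw [List.foldl_cons]
    by_cases hs : c = '/'
    · subst hs
      have hstep : pyParseExchangeStepB (out, seen, buf) '/' =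
          ((if seen then out ++ [String.ofList buf] else out), false, []) := by
        simp [pyParseExchangeStepB]
      rw [hstep, ih _ false [] (fun _ => rfl)]
      rw [splitCharP_cons_self]
      cases seen with
      | true =>
        by_cases hP : ':' ∈ (splitCharP '/' rest).1 <;>
          simp [List.foldl_cons, stepAC, hP, List.append_assoc]
      | false =>
        by_cases hP : ':' ∈ (splitCharP '/' rest).1 <;>
          simp [List.foldl_cons, stepAC, hP]
    · cases seen with
      | true =>
        have hstep : pyParseExchangeStepB (out, true, buf) c = (out, true, buf ++ [c]) := by
          simp [pyParseExchangeStepB, hs]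
        rw [hstep, ih _ true (buf ++ [c]) (by simp), splitCharP_cons_ne _ _ _ hs]
        simp [List.append_assoc]
      | false =>
        have hb := hinv rfl; subst hb
        by_cases hcl : c = ':'
        · subst hcl
          have hstep : pyParseExchangeStepB (out, false, []) ':' = (out, true, []) := by
            simp [pyParseExchangeStepB, hs]
          rw [hstep, ih _ true [] (by simp), splitCharP_cons_ne _ _ _ hs]
          simp [afterFirst]
        · have hstep : pyParseExchangeStepB (out, false, []) c = (out, false, []) := by
            simp [pyParseExchangeStepB, hs, hcl]
          rw [hstep, ih _ false [] (fun _ => rfl), splitCharP_cons_ne _ _ _ hs]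
          by_cases hP : ':' ∈ (splitCharP '/' rest).1 <;>
            simp [afterFirst, hcl, hP, Ne.symm hcl]

-- ===== VERDICT (by name: the statement is the Claim_ definition above) =====
theorem parse_exchange_py_spec : Claim_equal_parse_exchange_py := by
  intro exchange_str _
  unfold Spec_parse_exchange_py parse_exchange_py parse_exchange_py_alt
  cases exchange_str with
  | none => rfl
  | some s =>
    by_cases he : s = ""
    · simp [he]
    · dsimp only
      rw [if_neg he, if_neg he]
      have hsplit : (PySem.Str.split? s "/").getD [] =
          ((splitCharP '/' s.toList).1 :: (splitCharP '/' s.toList).2).map String.ofList := by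
        rw [PySem.Str.split?]
        have : PySem.Chars.split? s.toList ("/".toList) =
            some (PySem.Chars.splitOn s.toList ['/']) := by
          simp [PySem.Chars.split?]
        rw [this, splitOn_eq]
        rfl
      rw [hsplit, List.foldl_map]
      have hfun : (fun (acc : List String) (p : List Char) =>
          pyParseExchangeStepA acc (String.ofList p)) = stepAC := by
        funext acc p; exact stepA_ofList acc p
      rw [hfun]
      show _ = finishB (s.toList.foldl pyParseExchangeStepB ([], false, []))
      rw [scan_main s.toList [] false [] (fun _ => rfl), List.foldl_cons]
      simp [stepAC]
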